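-- pv_equiv track=rewrite | github.com/timcera/vigor_rst_tables | python3/vigor_rst_tables/rst_tables.py | join_rows
-- ===== SOURCE A (Python) =====
-- def join_rows(rows, sep="\n"):
--     """Given a list of rows (a list of lists) this function returns a
--     flattened list where each the individual columns of all rows are joined
--     together using the line separator.
--
--     """
--     output = []
--     for row in rows:
--         # grow output array, if necessary
--         if len(output) <= len(row):
--             for i in range(len(row) - len(output)):
--                 output.extend([[]])
--
--         for i, field in enumerate(row):
--             field_text = field.strip()
--             if field_text:
--                 output[i].append(field_text)
--     return [sep.join(lines) for lines in output]
-- ===== SOURCE B (Python) =====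
-- def join_rows(rows, sep="\n"):
--     """Column-major re-implementation: transpose-first instead of a growing
--     row-major accumulator."""
--     ncols = max((len(row) for row in rows), default=0)
--     return [
--         sep.join(row[i].strip() for row in rows if i < len(row) and row[i].strip())
--         for i in range(ncols)
--     ]
-- ===== Notes on version B (the rewrite author's own statement) =====
-- stated objective: idiomatic
-- what changed: Replaces A's row-major fold with a growing per-column accumulator (pad-then-append-in-place) by a column-major comprehension: compute the column count once, then build each joined column directly from the rows.
import Mathlib
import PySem

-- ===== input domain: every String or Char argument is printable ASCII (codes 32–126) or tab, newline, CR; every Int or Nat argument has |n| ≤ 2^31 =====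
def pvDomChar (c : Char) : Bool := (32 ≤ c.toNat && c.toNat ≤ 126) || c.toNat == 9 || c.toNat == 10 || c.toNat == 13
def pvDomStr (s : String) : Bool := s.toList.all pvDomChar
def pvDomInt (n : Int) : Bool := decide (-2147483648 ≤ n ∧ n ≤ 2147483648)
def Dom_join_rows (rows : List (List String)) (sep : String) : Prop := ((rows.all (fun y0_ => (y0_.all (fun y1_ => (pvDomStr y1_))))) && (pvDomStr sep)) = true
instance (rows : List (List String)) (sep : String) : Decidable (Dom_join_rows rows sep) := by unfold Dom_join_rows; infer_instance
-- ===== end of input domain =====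

-- B is a column-major (transpose-first) rewrite of A's row-major growing accumulator; same cost, more idiomatic.

-- ===== PORT A =====
-- helper: Python's enumerate(row), transliterated by hand (exact: Nat indices starting at 0)
def pyEnumFrom {α : Type} (k : Nat) : List α → List (Nat × α)
  | [] => []
  | x :: xs => (k, x) :: pyEnumFrom (k + 1) xs

-- inner loop body: `field_text = field.strip(); if field_text: output[i].append(field_text)`
def stepField (output : List (List String)) (p : Nat × String) : List (List String) :=
  let field_text := PySem.Str.strip p.2
  if field_text ≠ "" then output.set p.1 (output.getD p.1 [] ++ [field_text]) else output

-- one iteration of A's outer loop: grow `output` if necessary, then scan the row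
def stepRow (output : List (List String)) (row : List String) : List (List String) :=
  let output :=
    if output.length ≤ row.length then
      (List.range (row.length - output.length)).foldl (fun o _ => o ++ [[]]) output
    else output
  (pyEnumFrom 0 row).foldl stepField output

def join_rows (rows : List (List String)) (sep : String) : List String :=
  (rows.foldl stepRow []).map (fun lines => PySem.Str.join sep lines)

-- ===== PORT B =====
-- the comprehension `[row[i].strip() for row in rows if i < len(row) and row[i].strip()]`
def colB (rows : List (List String)) (i : Nat) : List String :=
  rows.filterMap (fun row =>
    if h : i < row.length then
      (if PySem.Str.strip row[i] ≠ "" then some (PySem.Str.strip row[i]) else none)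
    else none)

def join_rows_alt (rows : List (List String)) (sep : String) : List String :=
  let ncols := (rows.map List.length).foldl max 0
  (List.range ncols).map (fun i => PySem.Str.join sep (colB rows i))

-- ===== PRECONDITION & SPEC =====
def Spec_join_rows (rows : List (List String)) (sep : String) (out : List String) : Prop := out = join_rows_alt rows sep
instance (rows : List (List String)) (sep : String) (out : List String) : Decidable (Spec_join_rows rows sep out) := by unfold Spec_join_rows; infer_instance

-- ===== CLAIM (what is proved, stated in full; the proofs are below) =====
def Claim_equal_join_rows : Prop := ∀ (rows : List (List String)) (sep : String), Dom_join_rows rows sep → Spec_join_rows rows sep (join_rows rows sep)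

-- ===== LEMMAS AND PROOFS =====

-- the contribution of one row to column i (as a 0- or 1-element list)
def colOf (r : List String) (i : Nat) : List String :=
  if h : i < r.length then
    (if PySem.Str.strip r[i] ≠ "" then [PySem.Str.strip r[i]] else [])
  else []

def ML (rows : List (List String)) : Nat := (rows.map List.length).foldl max 0

theorem foldl_max_acc (l : List Nat) : ∀ a : Nat, l.foldl max a = max a (l.foldl max 0) := by
  induction l with
  | nil => intro a; simp
  | cons x xs ih => intro a; simp only [List.foldl_cons, ih (max a x), ih (max 0 x)]; omega

theorem ML_cons (r : List String) (rs : List (List String)) :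
    ML (r :: rs) = max r.length (ML rs) := by
  unfold ML
  simp only [List.map_cons, List.foldl_cons]
  rw [foldl_max_acc]
  omega

theorem colB_cons (r : List String) (rs : List (List String)) (i : Nat) :
    colB (r :: rs) i = colOf r i ++ colB rs i := by
  simp only [colB, colOf, List.filterMap_cons]
  by_cases h : i < r.length
  · by_cases hne : PySem.Str.strip r[i] = "" <;> simp [h, hne]
  · simp [h]

theorem colOf_cons_succ (f : String) (fs : List String) (i : Nat) :
    colOf (f :: fs) (i + 1) = colOf fs i := by
  simp [colOf]

theorem colOf_zero_cons (f : String) (fs : List String) :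
    colOf (f :: fs) 0 = if PySem.Str.strip f ≠ "" then [PySem.Str.strip f] else [] := by
  simp [colOf]

theorem pad_foldl (out : List (List String)) : ∀ n : Nat,
    (List.range n).foldl (fun o _ => o ++ [[]]) out = out ++ List.replicate n [] := by
  intro n
  induction n with
  | zero => simp
  | succ m ih =>
      rw [List.range_succ, List.foldl_append, ih, List.replicate_succ']
      simp

theorem getD_pad (out : List (List String)) (n j : Nat) :
    (out ++ List.replicate n ([] : List String)).getD j [] = out.getD j [] := by
  rcases Nat.lt_or_ge j out.length with h | h
  · rw [List.getD_eq_getElem?_getD, List.getElem?_append_left h, ← List.getD_eq_getElem?_getD]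
  · rw [List.getD_eq_getElem?_getD, List.getElem?_append_right h,
      List.getD_eq_getElem?_getD]
    simp [List.getElem?_replicate, List.getElem?_eq_none (by omega : out.length ≤ j)]
    split <;> simp

theorem inner_fold (r : List String) : ∀ (k : Nat) (out : List (List String)),
    k + r.length ≤ out.length →
    ((pyEnumFrom k r).foldl stepField out).length = out.length ∧
    ∀ j, ((pyEnumFrom k r).foldl stepField out).getD j [] =
      out.getD j [] ++ (if k ≤ j then colOf r (j - k) else []) := by
  induction r with
  | nil =>
      intro k out _
      refine ⟨rfl, fun j => ?_⟩
      simp [pyEnumFrom, colOf]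
  | cons f fs ih =>
      intro k out hk
      simp only [pyEnumFrom, List.foldl_cons]
      have hklt : k < out.length := by simp at hk; omega
      have hlen' : (stepField out (k, f)).length = out.length := by
        simp only [stepField]; split <;> simp
      have hrec := ih (k + 1) (stepField out (k, f))
        (by rw [hlen']; simp at hk ⊢; omega)
      refine ⟨by rw [hrec.1, hlen'], fun j => ?_⟩
      rw [hrec.2 j]
      by_cases hj : j = k
      · subst hj
        rw [if_neg (by omega : ¬ j + 1 ≤ j), if_pos (le_refl j), Nat.sub_self,
          List.append_nil, colOf_zero_cons]
        simp only [stepField]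
        split
        · rw [List.getD_eq_getElem?_getD, List.getElem?_set_self (by omega)]
          simp
        · simp
      · have hset : (stepField out (k, f)).getD j [] = out.getD j [] := by
          simp only [stepField]
          split
          · rw [List.getD_eq_getElem?_getD, List.getElem?_set_ne (by omega),
              ← List.getD_eq_getElem?_getD]
          · rfl
        rw [hset]
        congr 1
        rcases Nat.lt_or_ge j k with h | h
        · rw [if_neg (by omega), if_neg (by omega)]
        · have hj1 : k + 1 ≤ j := by omega
          rw [if_pos hj1, if_pos h]
          have : j - k = (j - (k + 1)) + 1 := by omega
          rw [this, colOf_cons_succ]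

theorem stepRow_spec (out : List (List String)) (r : List String) :
    (stepRow out r).length = max out.length r.length ∧
    ∀ j, (stepRow out r).getD j [] = out.getD j [] ++ colOf r j := by
  simp only [stepRow]
  set padded := if out.length ≤ r.length then
      (List.range (r.length - out.length)).foldl (fun o _ => o ++ [[]]) out
    else out with hpad
  have hplen : padded.length = max out.length r.length := by
    rw [hpad]; split
    · rw [pad_foldl]; simp; omega
    · simp; omega
  have hpd : ∀ j, padded.getD j [] = out.getD j [] := by
    intro j; rw [hpad]; split
    · rw [pad_foldl, getD_pad]
    · rfl
  have h := inner_fold r 0 padded (by omega)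
  refine ⟨by rw [h.1, hplen], fun j => ?_⟩
  rw [h.2 j, hpd j]
  simp

theorem outer_fold (rows : List (List String)) : ∀ out : List (List String),
    (rows.foldl stepRow out).length = max out.length (ML rows) ∧
    ∀ j, (rows.foldl stepRow out).getD j [] = out.getD j [] ++ colB rows j := by
  induction rows with
  | nil =>
      intro out
      refine ⟨by simp [ML], fun j => ?_⟩
      simp [colB]
  | cons r rs ih =>
      intro out
      simp only [List.foldl_cons]
      have hs := stepRow_spec out r
      have hrec := ih (stepRow out r)
      constructor
      · rw [hrec.1, hs.1, ML_cons]; omega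
      · intro j
        rw [hrec.2 j, hs.2 j, colB_cons, List.append_assoc]

-- ===== VERDICT (by name: the statement is the Claim_ definition above) =====
theorem join_rows_spec : Claim_equal_join_rows := by
  intro rows sep _
  unfold Spec_join_rows join_rows join_rows_alt
  have h := outer_fold rows []
  have hlen : (rows.foldl stepRow []).length = ML rows := by rw [h.1]; simp
  have hget : ∀ j, (rows.foldl stepRow []).getD j [] = colB rows j := by
    intro j; rw [h.2 j]; simp
  apply List.ext_getElem
  · simp [hlen, ML]
  · intro i h1 h2
    simp only [List.getElem_map, List.getElem_range]
    congr 1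
    rw [← hget i, List.getD_eq_getElem?_getD, List.getElem?_eq_getElem (by simpa using h1)]
    simp
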